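-- pv_equiv track=rewrite | github.com/tushushu/leetcode | python/205. 同构字符串.py | helper
-- ===== SOURCE A (Python) =====
-- def helper(s: str) -> list:
--     l = []
--     d = dict()
--     i = 0
--     for c in s:
--         if c in d:
--             l.append(d[c])
--         else:
--             d[c] = i
--             i += 1
--             l.append(d[c])
--     return l
-- ===== SOURCE B (Python) =====
-- def helper(s: str) -> list:
--     # rank of c in first-occurrence order = number of distinct chars before c's first occurrence
--     return [len(set(s[:s.index(c)])) for c in s]
-- ===== Notes on version B (the rewrite author's own statement) =====
-- stated objective: alternative
-- what changed: Replaces A's stateful single pass (incrementally built dict plus running counter) by a stateless per-character closed form: each output is len(set(s[:s.index(c)])), the count of distinct characters before c's first occurrence; no dictionary or accumulator is maintained at all.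
import Mathlib
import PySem

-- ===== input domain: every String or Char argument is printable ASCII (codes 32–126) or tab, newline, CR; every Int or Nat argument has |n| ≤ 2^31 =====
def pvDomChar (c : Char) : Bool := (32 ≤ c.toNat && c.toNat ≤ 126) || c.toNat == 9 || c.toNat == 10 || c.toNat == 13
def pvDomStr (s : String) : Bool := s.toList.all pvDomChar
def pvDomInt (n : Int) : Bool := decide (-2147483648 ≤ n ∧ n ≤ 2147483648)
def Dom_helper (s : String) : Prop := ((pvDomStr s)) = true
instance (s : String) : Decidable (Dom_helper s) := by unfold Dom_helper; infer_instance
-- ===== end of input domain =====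

-- B replaces A's stateful pass (incrementally built dict + running counter) by a stateless
-- per-character closed form: len(set(s[:s.index(c)])); objective: alternative (not faster).

-- ===== PORT A =====
-- the for-loop of A over the characters, with state (l, d, i)
def helperLoop : List Char → List Int → PySem.Dict Char Int → Int → List Int
  | [], l, _, _ => l
  | c :: rest, l, d, i =>
    if d.contains c then
      helperLoop rest (l ++ [d.getD c 0]) d i
    else
      -- d[c] = i; i += 1; l.append(d[c]) — the lookup d[c] always succeeds here, so getD is exact
      helperLoop rest (l ++ [(d.insert c i).getD c 0]) (d.insert c i) (i + 1)

def helper (s : String) : List Int := helperLoop s.toList [] PySem.Dict.empty 0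

-- ===== PORT B =====
def helper_alt (s : String) : List Int :=
  s.toList.map (fun c =>
    -- s.index(c) always succeeds here (c is drawn from s), so getD is exact;
    -- for a single-character needle str.index equals the list index? over the characters
    let f : Nat := (PySem.List.index? s.toList c).getD 0
    ((PySem.Set.ofList (PySem.List.slice s.toList none (some (f : Int)))).length : Int))

-- ===== PRECONDITION & SPEC =====
def Spec_helper (s : String) (out : List Int) : Prop := out = helper_alt s
instance (s : String) (out : List Int) : Decidable (Spec_helper s out) := by unfold Spec_helper; infer_instance

-- ===== CLAIM (what is proved, stated in full; the proofs are below) =====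
def Claim_equal_helper : Prop := ∀ (s : String), Dom_helper s → Spec_helper s (helper s)

-- ===== LEMMAS AND PROOFS =====

-- the rank of a character: its index in the first-occurrence list D (always present when used)
def rankIn (D : List Char) (c : Char) : Int := (((PySem.List.index? D c).getD 0 : Nat) : Int)

-- the dict A has built after consuming the prefix p (proof-side invariant value)
def pvDictOf (p : List Char) : PySem.Dict Char Int :=
  (PySem.List.enumerate (PySem.List.dedup p) 0).foldl (fun d q => d.insert q.2 q.1) PySem.Dict.empty

theorem pvDictOf_items (p : List Char) :
    (pvDictOf p).items
      = (PySem.List.enumerate (PySem.List.dedup p) 0).map (fun q => (q.2, q.1)) := by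
  unfold pvDictOf
  rw [PySem.Dict.items_foldl_insert_fresh (PySem.List.enumerate (PySem.List.dedup p) 0)
      (fun q => q.2) (fun q => q.1) PySem.Dict.empty
      (by intro a _; simp [pysem])
      (by simp)]
  simp [show PySem.Dict.empty.items = ([] : List (Char × Int)) from rfl]

theorem pvDictOf_keys (p : List Char) : (pvDictOf p).keys = PySem.List.dedup p := by
  have h := pvDictOf_items p
  simp only [PySem.Dict.keys, h, List.map_map]
  simp [Function.comp_def]

theorem pvDictOf_keys_nodup (p : List Char) : (pvDictOf p).keys.Nodup := by
  rw [pvDictOf_keys, PySem.List.dedup_eq_ofList]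
  exact PySem.Set.nodup_ofList p

theorem pvDictOf_contains (p : List Char) (c : Char) :
    (pvDictOf p).contains c = decide (c ∈ PySem.List.dedup p) := by
  rw [PySem.Dict.contains_eq_decide_mem_keys, pvDictOf_keys]

theorem pvDictOf_getD (p : List Char) (c : Char) (h : c ∈ PySem.List.dedup p) :
    (pvDictOf p).getD c 0 = rankIn (PySem.List.dedup p) c := by
  have hsome : (PySem.List.index? (PySem.List.dedup p) c).isSome := by
    rw [PySem.List.index?_isSome_iff]; exact h
  obtain ⟨k, hk⟩ := Option.isSome_iff_exists.mp hsome
  obtain ⟨hlt, hget, -⟩ := PySem.List.getElem_of_index?_eq_some hk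
  have hpair : ((c, (k : Int))) ∈ (pvDictOf p).items := by
    rw [pvDictOf_items]
    refine List.mem_map.mpr ⟨((k : Int), c), ?_, rfl⟩
    rw [PySem.List.mem_enumerate_iff]
    refine ⟨k, hlt, ?_⟩
    rw [hget]
    simp
  rw [PySem.Dict.getD_of_mem_items _ hpair (pvDictOf_keys_nodup p) 0]
  simp only [rankIn, hk, Option.getD_some]

theorem dedup_snoc_mem (p : List Char) (c : Char) (h : c ∈ p) :
    PySem.List.dedup (p ++ [c]) = PySem.List.dedup p := by
  simp only [PySem.List.dedup_eq_ofList, PySem.Set.ofList_append_singleton]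
  apply PySem.Set.add_of_mem
  simp [PySem.Set.mem_ofList, h]

theorem dedup_snoc_not_mem (p : List Char) (c : Char) (h : c ∉ p) :
    PySem.List.dedup (p ++ [c]) = PySem.List.dedup p ++ [c] := by
  simp only [PySem.List.dedup_eq_ofList, PySem.Set.ofList_append_singleton]
  apply PySem.Set.add_of_not_mem
  simp [PySem.Set.mem_ofList, h]

theorem dedup_append_prefix (p q : List Char) :
    ∃ t, PySem.List.dedup (p ++ q) = PySem.List.dedup p ++ t := by
  simp only [PySem.List.dedup_eq_ofList, PySem.Set.ofList_append]
  exact ⟨_, PySem.Set.update_eq_append_filter _ _⟩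

theorem rank_prefix_mem (p q : List Char) (c : Char) (h : c ∈ PySem.List.dedup p) :
    rankIn (PySem.List.dedup (p ++ q)) c = rankIn (PySem.List.dedup p) c := by
  obtain ⟨t, ht⟩ := dedup_append_prefix p q
  rw [ht]
  unfold rankIn
  rw [PySem.List.index?_append_of_mem t h]

theorem pvDictOf_snoc_not_mem (p : List Char) (c : Char) (h : c ∉ p) :
    pvDictOf (p ++ [c])
      = (pvDictOf p).insert c ((PySem.List.dedup p).length : Int) := by
  unfold pvDictOf
  rw [dedup_snoc_not_mem p c h, PySem.List.enumerate_append, List.foldl_append]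
  simp

theorem loopA (rest : List Char) : ∀ (p : List Char) (l : List Int),
    helperLoop rest l (pvDictOf p) ((PySem.List.dedup p).length : Int)
      = l ++ rest.map (fun c => rankIn (PySem.List.dedup (p ++ rest)) c) := by
  induction rest with
  | nil => intro p l; simp [helperLoop]
  | cons c rest ih =>
    intro p l
    by_cases hc : c ∈ p
    · have hcd : c ∈ PySem.List.dedup p := by
        rw [PySem.List.mem_dedup]; exact hc
      have hded := dedup_snoc_mem p c hc
      have hhead : (pvDictOf p).getD c 0 = rankIn (PySem.List.dedup (p ++ c :: rest)) c := by
        rw [pvDictOf_getD p c hcd, rank_prefix_mem p (c :: rest) c hcd]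
      simp only [helperLoop, pvDictOf_contains, hcd, decide_true, if_true]
      rw [hhead,
        show pvDictOf p = pvDictOf (p ++ [c]) by unfold pvDictOf; rw [hded],
        show ((PySem.List.dedup p).length : Int) = ((PySem.List.dedup (p ++ [c])).length : Int) by
          rw [hded],
        ih (p ++ [c])]
      simp [List.append_assoc]
    · have hcd : c ∉ PySem.List.dedup p := by
        rw [PySem.List.mem_dedup]; exact hc
      have hmem' : c ∈ PySem.List.dedup (p ++ [c]) := by
        rw [dedup_snoc_not_mem p c hc]; simp
      have hhead : (pvDictOf (p ++ [c])).getD c 0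
          = rankIn (PySem.List.dedup ((p ++ [c]) ++ rest)) c := by
        rw [pvDictOf_getD _ _ hmem', rank_prefix_mem (p ++ [c]) rest c hmem']
      have hlen : ((PySem.List.dedup p).length : Int) + 1
          = ((PySem.List.dedup (p ++ [c])).length : Int) := by
        rw [dedup_snoc_not_mem p c hc]; simp
      simp only [helperLoop, pvDictOf_contains, hcd, decide_false,
        ← pvDictOf_snoc_not_mem p c hc]
      rw [hhead, hlen, ih (p ++ [c])]
      simp [List.append_assoc]

-- B's closed form: the distinct count of the prefix before the first occurrence IS the rank
theorem setlen_take_eq_rank (p : List Char) (c : Char) (f : Nat)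
    (h : PySem.List.index? p c = some f) :
    ((PySem.Set.ofList (p.take f)).length : Int) = rankIn (PySem.List.dedup p) c := by
  obtain ⟨pre, suf, hp, hlen, hnot⟩ := (PySem.List.index?_eq_some_iff _ _ _).mp h
  subst hp; subst hlen
  have htake : (pre ++ c :: suf).take pre.length = pre := List.take_left
  have hnotd : c ∉ PySem.List.dedup pre := by rw [PySem.List.mem_dedup]; exact hnot
  obtain ⟨t, ht⟩ := dedup_append_prefix (pre ++ [c]) suf
  rw [dedup_snoc_not_mem pre c hnot] at ht
  have hidx : PySem.List.index? (PySem.List.dedup (pre ++ c :: suf)) c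
      = some (PySem.List.dedup pre).length := by
    rw [show pre ++ c :: suf = (pre ++ [c]) ++ suf by simp, ht,
      PySem.List.index?_append_of_mem t (by simp : c ∈ PySem.List.dedup pre ++ [c]),
      PySem.List.index?_append_singleton_self _ c hnotd]
  rw [htake]
  unfold rankIn
  rw [hidx, ← PySem.List.dedup_eq_ofList]
  simp

theorem helper_alt_eq (s : String) :
    helper_alt s = s.toList.map (fun c => rankIn (PySem.List.dedup s.toList) c) := by
  refine List.map_congr_left ?_
  intro c hcmem
  have hsome : (PySem.List.index? s.toList c).isSome := by
    rw [PySem.List.index?_isSome_iff]; exact hcmem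
  obtain ⟨f, hf⟩ := Option.isSome_iff_exists.mp hsome
  show ((PySem.Set.ofList (PySem.List.slice s.toList none
      (some (((PySem.List.index? s.toList c).getD 0 : Nat) : Int)))).length : Int) = _
  rw [hf, Option.getD_some, PySem.List.slice_to_natCast]
  exact setlen_take_eq_rank s.toList c f hf

-- ===== VERDICT (by name: the statement is the Claim_ definition above) =====
theorem helper_spec : Claim_equal_helper := by
  intro s _
  unfold Spec_helper helper
  have h0 : PySem.Dict.empty = pvDictOf [] := rfl
  have h1 : (0 : Int) = ((PySem.List.dedup ([] : List Char)).length : Int) := rfl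
  rw [h0, h1, loopA, helper_alt_eq]
  simp
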